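-- pv_equiv track=rewrite | github.com/ptatien0307/CS112.M21.KHCL | BTVN/VetCan/robot.py | check
-- ===== SOURCE A (Python) =====
-- def check(n, m, path):
--     cnt_unsafe = 0
--     for i in range(n):
--         for j in range(m):
--             x, y = i, j
--             for c in path:
--                 if c == 'L':
--                     y -= 1
--                 elif c == 'R':
--                     y += 1
--                 elif c == 'U':
--                     x -= 1
--                 elif c == 'D':
--                     x += 1
--
--                 if x not in range(n) or y not in range(m):
--                     cnt_unsafe += 1
--                     break
--
--     if cnt_unsafe == n * m:
--         return False
--     else:
--         return True
-- ===== SOURCE B (Python) =====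
-- def check(n, m, path):
--     x = y = 0
--     min_x = max_x = min_y = max_y = 0
--     for c in path:
--         if c == 'L':
--             y -= 1
--         elif c == 'R':
--             y += 1
--         elif c == 'U':
--             x -= 1
--         elif c == 'D':
--             x += 1
--         if x < min_x:
--             min_x = x
--         elif x > max_x:
--             max_x = x
--         if y < min_y:
--             min_y = y
--         elif y > max_y:
--             max_y = y
--     return max_x - min_x < n and max_y - min_y < m
-- ===== Notes on version B (the rewrite author's own statement) =====
-- stated objective: faster
-- what changed: Instead of simulating the path from every one of the n*m start cells and counting unsafe starts, B walks the path once accumulating per-axis min/max prefix offsets and tests whether the offset span fits in each grid dimension.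
-- outside the precondition, e.g. on check(-1, 2, ''): A returns True, B returns False; on check(-2, -3, 'L'): A returns True, B returns False
import Mathlib
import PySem

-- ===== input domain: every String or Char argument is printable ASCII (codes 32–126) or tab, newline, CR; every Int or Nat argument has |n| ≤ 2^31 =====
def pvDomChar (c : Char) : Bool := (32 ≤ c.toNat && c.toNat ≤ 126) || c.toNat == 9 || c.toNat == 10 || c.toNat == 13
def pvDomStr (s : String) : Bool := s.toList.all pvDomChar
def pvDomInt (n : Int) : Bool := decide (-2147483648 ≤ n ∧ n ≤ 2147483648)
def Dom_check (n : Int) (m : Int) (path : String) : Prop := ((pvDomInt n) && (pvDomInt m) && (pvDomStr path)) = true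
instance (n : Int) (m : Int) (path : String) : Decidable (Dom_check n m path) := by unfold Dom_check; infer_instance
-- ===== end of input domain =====

-- B replaces A's scan over all n*m start cells (each replaying the path) by one pass over the
-- path accumulating per-axis min/max offsets and a feasible-start-range test: O(|path|) instead
-- of O(n*m*|path|) (objective: faster).

-- ===== PORT A =====
-- one move of the robot: the if/elif chain shared verbatim by Source A and Source B
def pvStep (c : Char) (x : Int) (y : Int) : Int × Int :=
  if c = 'L' then (x, y - 1)
  else if c = 'R' then (x, y + 1)
  else if c = 'U' then (x - 1, y)
  else if c = 'D' then (x + 1, y)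
  else (x, y)

-- A's innermost 'for c in path: … if x not in range(n) or y not in range(m): break':
-- returns true iff the walk from (x, y) leaves the grid (the 'break' taken)
def pvUnsafe (n : Int) (m : Int) : Int → Int → List Char → Bool
  | _, _, [] => false
  | x, y, c :: cs =>
    let p := pvStep c x y
    if ¬(0 ≤ p.1 ∧ p.1 < n ∧ 0 ≤ p.2 ∧ p.2 < m) then true
    else pvUnsafe n m p.1 p.2 cs

def check (n : Int) (m : Int) (path : String) : Bool :=
  let cnt : Int :=
    (PySem.List.pyRange 0 n 1).foldl
      (fun acc i =>
        (PySem.List.pyRange 0 m 1).foldl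
          (fun acc2 j => if pvUnsafe n m i j path.toList then acc2 + 1 else acc2) acc) 0
  if cnt = n * m then false else true

-- ===== PORT B =====
-- one iteration of Source B's loop: state (x, y, min_x, max_x, min_y, max_y)
def pvScan : (Int × Int × Int × Int × Int × Int) → Char → (Int × Int × Int × Int × Int × Int)
  | (x, y, mnx, mxx, mny, mxy), c =>
    let p := pvStep c x y
    let mmx := if p.1 < mnx then (p.1, mxx) else if p.1 > mxx then (mnx, p.1) else (mnx, mxx)
    let mmy := if p.2 < mny then (p.2, mxy) else if p.2 > mxy then (mny, p.2) else (mny, mxy)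
    (p.1, p.2, mmx.1, mmx.2, mmy.1, mmy.2)

def check_alt (n : Int) (m : Int) (path : String) : Bool :=
  let s := path.toList.foldl pvScan (0, 0, 0, 0, 0, 0)
  decide (s.2.2.2.1 - s.2.2.1 < n ∧ s.2.2.2.2.2 - s.2.2.2.2.1 < m)

-- ===== PRECONDITION & SPEC =====
-- Pre_ excludes grids with a negative dimension and nonzero area, outside the task's natural
-- domain: there A's empty ranges make it return True although no start cell exists (an artefact
-- of the empty loops), while B naturally returns False.
def Pre_check (n : Int) (m : Int) (path : String) : Prop := (0 ≤ n ∧ 0 ≤ m) ∨ n * m = 0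
instance (n : Int) (m : Int) (path : String) : Decidable (Pre_check n m path) := by
  unfold Pre_check; infer_instance

def pvWitness_check : Int × Int × String := (2, 3, "LRUD")

def Spec_check (n : Int) (m : Int) (path : String) (out : Bool) : Prop := out = check_alt n m path
instance (n : Int) (m : Int) (path : String) (out : Bool) : Decidable (Spec_check n m path out) := by
  unfold Spec_check; infer_instance

-- ===== CLAIM (what is proved, stated in full; the proofs are below) =====
def Claim_equal_check : Prop := ∀ (n : Int) (m : Int) (path : String),
  Dom_check n m path → Pre_check n m path → Spec_check n m path (check n m path)

-- ===== LEMMAS AND PROOFS =====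

-- per-character displacements
def pvDX (c : Char) : Int := if c = 'U' then -1 else if c = 'D' then 1 else 0
def pvDY (c : Char) : Int := if c = 'L' then -1 else if c = 'R' then 1 else 0

theorem pvStep_eq (c : Char) (x y : Int) : pvStep c x y = (x + pvDX c, y + pvDY c) := by
  unfold pvStep pvDX pvDY
  split_ifs <;> simp_all <;> omega

-- total displacement and min/max prefix displacement (prefixes including the empty one) per axis
def pvTX : List Char → Int
  | [] => 0
  | c :: cs => pvDX c + pvTX cs
def pvTY : List Char → Int
  | [] => 0
  | c :: cs => pvDY c + pvTY cs
def pvMnX : List Char → Int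
  | [] => 0
  | c :: cs => min 0 (pvDX c + pvMnX cs)
def pvMxX : List Char → Int
  | [] => 0
  | c :: cs => max 0 (pvDX c + pvMxX cs)
def pvMnY : List Char → Int
  | [] => 0
  | c :: cs => min 0 (pvDY c + pvMnY cs)
def pvMxY : List Char → Int
  | [] => 0
  | c :: cs => max 0 (pvDY c + pvMxY cs)

theorem pvMnX_nonpos (cs : List Char) : pvMnX cs ≤ 0 := by
  cases cs <;> simp [pvMnX]
theorem pvMxX_nonneg (cs : List Char) : 0 ≤ pvMxX cs := by
  cases cs <;> simp [pvMxX]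
theorem pvMnY_nonpos (cs : List Char) : pvMnY cs ≤ 0 := by
  cases cs <;> simp [pvMnY]
theorem pvMxY_nonneg (cs : List Char) : 0 ≤ pvMxY cs := by
  cases cs <;> simp [pvMxY]

-- characterisation of A's inner loop: a start survives iff the extreme prefix offsets stay inside
theorem pvUnsafe_iff (n m : Int) (cs : List Char) :
    ∀ x y : Int, 0 ≤ x → x < n → 0 ≤ y → y < m →
      (pvUnsafe n m x y cs = false ↔
        (0 ≤ x + pvMnX cs ∧ x + pvMxX cs < n ∧ 0 ≤ y + pvMnY cs ∧ y + pvMxY cs < m)) := by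
  induction cs with
  | nil =>
    intro x y hx hxn hy hym
    simp [pvUnsafe, pvMnX, pvMxX, pvMnY, pvMxY]
    omega
  | cons c cs ih =>
    intro x y hx hxn hy hym
    have hmnx := pvMnX_nonpos cs
    have hmxx := pvMxX_nonneg cs
    have hmny := pvMnY_nonpos cs
    have hmxy := pvMxY_nonneg cs
    simp only [pvUnsafe, pvStep_eq, pvMnX, pvMxX, pvMnY, pvMxY]
    by_cases h : 0 ≤ x + pvDX c ∧ x + pvDX c < n ∧ 0 ≤ y + pvDY c ∧ y + pvDY c < m
    · rw [if_neg (by simpa using h)]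
      rw [ih (x + pvDX c) (y + pvDY c) h.1 h.2.1 h.2.2.1 h.2.2.2]
      omega
    · rw [if_pos (by simpa using h)]
      simp only [Bool.true_eq_false, false_iff]
      omega

-- B's fold computes exactly the total and extreme displacements
theorem pvScan_foldl (cs : List Char) :
    ∀ x y mnx mxx mny mxy : Int, mnx ≤ x → x ≤ mxx → mny ≤ y → y ≤ mxy →
      cs.foldl pvScan (x, y, mnx, mxx, mny, mxy) =
        (x + pvTX cs, y + pvTY cs, min mnx (x + pvMnX cs), max mxx (x + pvMxX cs),
          min mny (y + pvMnY cs), max mxy (y + pvMxY cs)) := by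
  induction cs with
  | nil =>
    intro x y mnx mxx mny mxy h1 h2 h3 h4
    simp [pvTX, pvTY, pvMnX, pvMxX, pvMnY, pvMxY]
    omega
  | cons c cs ih =>
    intro x y mnx mxx mny mxy h1 h2 h3 h4
    have hstep : pvScan (x, y, mnx, mxx, mny, mxy) c =
        (x + pvDX c, y + pvDY c, min mnx (x + pvDX c), max mxx (x + pvDX c),
          min mny (y + pvDY c), max mxy (y + pvDY c)) := by
      simp only [pvScan, pvStep_eq]
      split_ifs <;> simp <;> omega
    have hmnx := pvMnX_nonpos cs
    have hmxx := pvMxX_nonneg cs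
    have hmny := pvMnY_nonpos cs
    have hmxy := pvMxY_nonneg cs
    rw [List.foldl_cons, hstep,
      ih (x + pvDX c) (y + pvDY c) _ _ _ _ (min_le_right _ _) (le_max_right _ _)
        (min_le_right _ _) (le_max_right _ _)]
    simp only [pvTX, pvTY, pvMnX, pvMxX, pvMnY, pvMxY, Prod.mk.injEq]
    refine ⟨by omega, by omega, by omega, by omega, by omega, by omega⟩

theorem check_alt_eq (n m : Int) (path : String) :
    check_alt n m path =
      decide (pvMxX path.toList - pvMnX path.toList < n ∧
              pvMxY path.toList - pvMnY path.toList < m) := by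
  unfold check_alt
  rw [pvScan_foldl path.toList 0 0 0 0 0 0 le_rfl le_rfl le_rfl le_rfl]
  have h1 := pvMnX_nonpos path.toList
  have h2 := pvMxX_nonneg path.toList
  have h3 := pvMnY_nonpos path.toList
  have h4 := pvMxY_nonneg path.toList
  simp only [decide_eq_decide]
  omega

-- counting loop = countP
theorem pv_foldl_count (p : Int → Bool) (l : List Int) :
    ∀ a : Int, l.foldl (fun acc j => if p j then acc + 1 else acc) a = a + (l.countP p : Int) := by
  induction l with
  | nil => intro a; simp
  | cons x xs ih =>
    intro a
    simp only [List.foldl_cons, List.countP_cons, ih]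
    split_ifs with h <;> simp [h] <;> push_cast <;> omega

theorem pv_sum_le (g : Int → Int) (c : Int) :
    ∀ l : List Int, (∀ i ∈ l, g i ≤ c) → (l.map g).sum ≤ c * l.length := by
  intro l
  induction l with
  | nil => intro _; simp
  | cons x xs ih =>
    intro h
    have h1 := h x (by simp)
    have h2 := ih (fun i hi => h i (by simp [hi]))
    simp only [List.map_cons, List.sum_cons, List.length_cons]
    push_cast
    nlinarith

theorem pv_sum_eq_iff (g : Int → Int) (c : Int) :
    ∀ l : List Int, (∀ i ∈ l, g i ≤ c) →
      ((l.map g).sum = c * l.length ↔ ∀ i ∈ l, g i = c) := by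
  intro l
  induction l with
  | nil => intro _; simp
  | cons x xs ih =>
    intro h
    have h1 := h x (by simp)
    have hrest : ∀ i ∈ xs, g i ≤ c := fun i hi => h i (by simp [hi])
    have h2 := pv_sum_le g c xs hrest
    have h3 := ih hrest
    simp only [List.map_cons, List.sum_cons, List.length_cons, List.mem_cons]
    push_cast
    push_cast at h2 h3
    constructor
    · intro he
      have hgx : g x = c := by nlinarith
      have : (xs.map g).sum = c * xs.length := by nlinarith
      exact fun i hi => hi.elim (fun hx => hx ▸ hgx) (h3.mp this i)
    · intro hall
      have hgx : g x = c := hall x (Or.inl rfl)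
      have : (xs.map g).sum = c * xs.length := h3.mpr (fun i hi => hall i (Or.inr hi))
      nlinarith

theorem check_eq_iff (n m : Int) (path : String) (hn : 0 ≤ n) (hm : 0 ≤ m) :
    (check n m path = true ↔
      ¬ ∀ i ∈ PySem.List.pyRange 0 n 1, ∀ j ∈ PySem.List.pyRange 0 m 1,
          pvUnsafe n m i j path.toList = true) := by
  unfold check
  have hinner : (fun (acc : Int) (i : Int) =>
      (PySem.List.pyRange 0 m 1).foldl
        (fun acc2 j => if pvUnsafe n m i j path.toList then acc2 + 1 else acc2) acc) =
      fun acc i => acc +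
        (((PySem.List.pyRange 0 m 1).countP (fun j => pvUnsafe n m i j path.toList) : Int)) := by
    funext acc i
    exact pv_foldl_count _ _ acc
  rw [hinner, PySem.List.foldl_add]
  have hlenm : ((PySem.List.pyRange 0 m 1).length : Int) = m := by
    rw [PySem.List.length_pyRange_one]; omega
  have hlenn : ((PySem.List.pyRange 0 n 1).length : Int) = n := by
    rw [PySem.List.length_pyRange_one]; omega
  have hle : ∀ i ∈ PySem.List.pyRange 0 n 1,
      (((PySem.List.pyRange 0 m 1).countP (fun j => pvUnsafe n m i j path.toList) : Int)) ≤ m := by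
    intro i _
    calc (((PySem.List.pyRange 0 m 1).countP (fun j => pvUnsafe n m i j path.toList) : Int))
        ≤ ((PySem.List.pyRange 0 m 1).length : Int) := by
          exact_mod_cast List.countP_le_length
      _ = m := hlenm
  have hsum := pv_sum_eq_iff
    (fun i => (((PySem.List.pyRange 0 m 1).countP (fun j => pvUnsafe n m i j path.toList) : Int)))
    m (PySem.List.pyRange 0 n 1) hle
  have hcnt : ∀ i, ((((PySem.List.pyRange 0 m 1).countP
        (fun j => pvUnsafe n m i j path.toList) : Int)) = m ↔
      ∀ j ∈ PySem.List.pyRange 0 m 1, pvUnsafe n m i j path.toList = true) := by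
    intro i
    constructor
    · intro h
      apply List.countP_eq_length.mp
      omega
    · intro h
      have := List.countP_eq_length.mpr h
      omega
  constructor
  · intro h hall
    by_cases hc : (0 : Int) +
        ((PySem.List.pyRange 0 n 1).map
          (fun i => (((PySem.List.pyRange 0 m 1).countP
            (fun j => pvUnsafe n m i j path.toList) : Int)))).sum = n * m
    · simp [hc] at h
    · apply hc
      have : ((PySem.List.pyRange 0 n 1).map
          (fun i => (((PySem.List.pyRange 0 m 1).countP
            (fun j => pvUnsafe n m i j path.toList) : Int)))).sum =
          m * ((PySem.List.pyRange 0 n 1).length : Int) := by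
        exact hsum.mpr (fun i hi => (hcnt i).mpr (hall i hi))
      rw [this, hlenn]; ring
  · intro h
    have hne : (0 : Int) +
        ((PySem.List.pyRange 0 n 1).map
          (fun i => (((PySem.List.pyRange 0 m 1).countP
            (fun j => pvUnsafe n m i j path.toList) : Int)))).sum ≠ n * m := by
      intro hc
      apply h
      intro i hi
      exact (hcnt i).mp (hsum.mp (by rw [hlenn, mul_comm m n]; linarith) i hi)
    rw [if_neg hne]

theorem pv_key (n m : Int) (cs : List Char) (hn : 0 ≤ n) (hm : 0 ≤ m) :
    ((¬ ∀ i ∈ PySem.List.pyRange 0 n 1, ∀ j ∈ PySem.List.pyRange 0 m 1,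
        pvUnsafe n m i j cs = true) ↔
      (pvMxX cs - pvMnX cs < n ∧ pvMxY cs - pvMnY cs < m)) := by
  have hmnx := pvMnX_nonpos cs
  have hmxx := pvMxX_nonneg cs
  have hmny := pvMnY_nonpos cs
  have hmxy := pvMxY_nonneg cs
  constructor
  · intro h
    push_neg at h
    obtain ⟨i, hi, j, hj, hsafe⟩ := h
    rw [PySem.List.mem_pyRange_one] at hi hj
    have := (pvUnsafe_iff n m cs i j hi.1 hi.2 hj.1 hj.2).mp
      (by simpa using hsafe)
    omega
  · intro ⟨hx, hy⟩
    intro hall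
    have hi : (-pvMnX cs) ∈ PySem.List.pyRange 0 n 1 := by
      rw [PySem.List.mem_pyRange_one]; omega
    have hj : (-pvMnY cs) ∈ PySem.List.pyRange 0 m 1 := by
      rw [PySem.List.mem_pyRange_one]; omega
    have hsafe := (pvUnsafe_iff n m cs (-pvMnX cs) (-pvMnY cs)
      (by omega) (by omega) (by omega) (by omega)).mpr (by constructor <;> omega)
    rw [hall _ hi _ hj] at hsafe
    exact absurd hsafe (by simp)

theorem check_degenerate (n m : Int) (path : String) (h : n = 0 ∨ m = 0) :
    check n m path = false := by
  have haux : ∀ (l : List Int) (a : Int), l.foldl (fun acc _ => acc) a = a := by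
    intro l
    induction l <;> simp_all
  unfold check
  rcases h with h | h <;> subst h
  · rw [PySem.List.pyRange_one_eq_nil le_rfl]
    simp
  · simp only [PySem.List.pyRange_one_eq_nil (le_refl (0 : Int)), List.foldl_nil, haux,
      mul_zero, if_true]

theorem check_alt_degenerate (n m : Int) (path : String) (h : n ≤ 0 ∨ m ≤ 0) :
    check_alt n m path = false := by
  rw [check_alt_eq]
  have h1 := pvMnX_nonpos path.toList
  have h2 := pvMxX_nonneg path.toList
  have h3 := pvMnY_nonpos path.toList
  have h4 := pvMxY_nonneg path.toList
  simp only [decide_eq_false_iff_not]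
  omega

-- ===== VERDICT (by name: the statement is the Claim_ definition above) =====
theorem check_spec : Claim_equal_check := by
  intro n m path _ hpre
  unfold Spec_check
  rcases hpre with ⟨hn, hm⟩ | hz
  · rw [check_alt_eq]
    rw [Bool.eq_iff_iff]
    rw [check_eq_iff n m path hn hm, pv_key n m path.toList hn hm]
    simp
  · have hz' := mul_eq_zero.mp hz
    rw [check_degenerate n m path hz', check_alt_degenerate n m path (by omega)]
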